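-- pv_equiv track=rewrite | github.com/Hisham1404/trade_backend | app/middleware/security.py | sanitize_user_input
-- ===== SOURCE A (Python) =====
-- def sanitize_user_input(input_string: str) -> str:
--     """
--     Sanitize user input to prevent injection attacks.
--
--     Args:
--         input_string: Raw user input
--
--     Returns:
--         Sanitized input string
--     """
--     if not isinstance(input_string, str):
--         return str(input_string)
--
--     # Basic sanitization - remove potentially dangerous characters
--     dangerous_chars = ["<", ">", "&", '"', "'", "/", "\\"]
--     sanitized = input_string
--
--     for char in dangerous_chars:
--         sanitized = sanitized.replace(char, "")
--
--     # Limit length to prevent buffer overflows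
--     return sanitized[:1000]
-- ===== SOURCE B (Python) =====
-- def sanitize_user_input(input_string: str) -> str:
--     """Sanitize user input: drop dangerous characters in one pass, cap at 1000 chars."""
--     if not isinstance(input_string, str):
--         return str(input_string)
--     dangerous = {"<", ">", "&", '"', "'", "/", "\\"}
--     return "".join(c for c in input_string if c not in dangerous)[:1000]
-- ===== Notes on version B (the rewrite author's own statement) =====
-- stated objective: idiomatic
-- what changed: Replaces seven sequential full-string str.replace passes with a single character-level filtering pass using a set of dangerous characters, then the [:1000] slice.
import Mathlib
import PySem

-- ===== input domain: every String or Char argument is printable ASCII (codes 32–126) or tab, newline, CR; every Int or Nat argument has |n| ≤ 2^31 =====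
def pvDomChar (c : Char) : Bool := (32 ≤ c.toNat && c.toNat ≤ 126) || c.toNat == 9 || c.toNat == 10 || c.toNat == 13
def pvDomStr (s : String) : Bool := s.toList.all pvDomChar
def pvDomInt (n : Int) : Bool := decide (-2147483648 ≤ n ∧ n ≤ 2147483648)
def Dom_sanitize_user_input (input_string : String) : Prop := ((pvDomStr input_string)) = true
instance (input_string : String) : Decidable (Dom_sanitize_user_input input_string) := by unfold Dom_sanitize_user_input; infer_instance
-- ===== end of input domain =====

-- B replaces A's seven sequential str.replace passes with one filtering pass over the characters (set membership), then the [:1000] slice.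
-- The Python isinstance guard is vacuous under the String typing and has no Lean counterpart.

-- ===== PORT A =====
-- A: for char in dangerous_chars: sanitized = sanitized.replace(char, ""); return sanitized[:1000]
def pvDangerousA : List String := ["<", ">", "&", "\"", "'", "/", "\\"]

def sanitize_user_input (input_string : String) : String :=
  let sanitized := pvDangerousA.foldl (fun acc ch => PySem.Str.replace acc ch "") input_string
  PySem.Str.slice sanitized none (some 1000)

-- ===== PORT B =====
-- B: dangerous as a set; ''.join(c for c in input_string if c not in dangerous)[:1000]
def pvDangerousB : PySem.Set Char := PySem.Set.ofList ['<', '>', '&', '"', '\'', '/', '\\']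

def sanitize_user_input_alt (input_string : String) : String :=
  PySem.Str.slice
    (String.ofList (input_string.toList.filter (fun c => !(PySem.Set.contains pvDangerousB c))))
    none (some 1000)

-- ===== PRECONDITION & SPEC =====
def Spec_sanitize_user_input (input_string : String) (out : String) : Prop := out = sanitize_user_input_alt input_string
instance (input_string : String) (out : String) : Decidable (Spec_sanitize_user_input input_string out) := by unfold Spec_sanitize_user_input; infer_instance

-- ===== CLAIM (what is proved, stated in full; the proofs are below) =====
def Claim_equal_sanitize_user_input : Prop := ∀ (input_string : String), Dom_sanitize_user_input input_string → Spec_sanitize_user_input input_string (sanitize_user_input input_string)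

-- ===== LEMMAS AND PROOFS =====

-- replace.go with a one-char pattern and empty replacement is exactly a filter
theorem pv_go_single (c : Char) : ∀ (fuel : Nat) (l acc : List Char), l.length ≤ fuel →
    PySem.Chars.replace.go [c] [] fuel l acc = acc.reverse ++ l.filter (fun x => x != c) := by
  intro fuel
  induction fuel with
  | zero =>
    intro l acc h
    have : l = [] := List.length_eq_zero_iff.mp (Nat.le_zero.mp h)
    subst this
    simp [PySem.Chars.replace.go]
  | succ n ih =>
    intro l acc h
    cases l with
    | nil => simp [PySem.Chars.replace.go]
    | cons x t =>
      by_cases hx : c = x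
      · subst hx
        have hpre : List.isPrefixOf [c] (c :: t) = true := by simp [List.isPrefixOf]
        simp only [PySem.Chars.replace.go, hpre, if_true, List.length_cons,
          List.length_nil, List.drop_succ_cons, List.drop_zero, List.reverse_nil, List.nil_append]
        rw [ih t acc (by simpa using Nat.le_of_succ_le_succ h)]
        simp
      · have hpre : List.isPrefixOf [c] (x :: t) = false := by
          simp [List.isPrefixOf]; exact hx
        simp only [PySem.Chars.replace.go, hpre]
        rw [ih t (x :: acc) (by simpa using Nat.le_of_succ_le_succ h)]
        simp [Ne.symm hx]

theorem pv_replace_single (s : List Char) (c : Char) :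
    PySem.Chars.replace s [c] [] = s.filter (fun x => x != c) := by
  have h := pv_go_single c s.length s [] (le_refl _)
  simpa [PySem.Chars.replace] using h

-- ===== VERDICT (by name: the statement is the Claim_ definition above) =====
set_option maxHeartbeats 800000 in
theorem sanitize_user_input_spec : Claim_equal_sanitize_user_input := by
  intro s _
  unfold Spec_sanitize_user_input sanitize_user_input sanitize_user_input_alt
  rw [← String.toList_inj]
  simp only [pvDangerousA, List.foldl_cons, List.foldl_nil, PySem.Str.toList_slice,
    PySem.Str.toList_replace, String.toList_ofList]
  refine congrArg (fun t => PySem.Chars.slice t none (some 1000)) ?_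
  have hlt : "<".toList = ['<'] := rfl
  have hgt : ">".toList = ['>'] := rfl
  have hamp : "&".toList = ['&'] := rfl
  have hq : "\"".toList = ['"'] := rfl
  have hsq : "'".toList = ['\''] := rfl
  have hsl : "/".toList = ['/'] := rfl
  have hbs : "\\".toList = ['\\'] := rfl
  have hnil : "".toList = [] := rfl
  rw [hlt, hgt, hamp, hq, hsq, hsl, hbs, hnil]
  simp only [pv_replace_single, List.filter_filter]
  refine List.filter_congr ?_
  intro c _
  have hB : pvDangerousB = ['<', '>', '&', '"', '\'', '/', '\\'] := by decide
  rw [hB]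
  simp only [PySem.Set.contains_eq_listContains, List.contains_cons, List.contains_nil,
    Bool.or_false, Bool.not_or, bne]
  simp [Bool.and_assoc, Bool.and_comm, Bool.and_left_comm]
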